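-- pv_equiv track=rewrite | github.com/busebd12/InterviewPreparation | LeetCode/Python/Medium/2385-Amount-of-Time-for-Binary-Tree-to-Be-Infected/solution.py | bfs
-- ===== SOURCE A (Python) =====
-- from typing import Dict, List
--
-- from collections import deque
--
-- def bfs(hashmap: Dict[int, List[int]], start: int) -> int:
--     total_time=0
--
--     queue=deque()
--
--     limit=(10**5) + 1
--
--     visited=[False for _ in range(0, limit)]
--
--     visited[start]=True
--
--     queue.append(start)
--
--     while queue:
--         q_size=len(queue)
--
--         for iteration in range(0, q_size):
--             node=queue.popleft()
--
--             for neighbour in hashmap[node]: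
--                 if not visited[neighbour]:
--                     queue.append(neighbour)
--
--                     visited[neighbour]=True
--
--         if queue:
--             total_time+=1
--
--
--     return total_time
-- ===== SOURCE B (Python) =====
-- from collections import deque
--
-- def bfs(hashmap, start):
--     dist = {start: 0}
--     queue = deque([start])
--     while queue:
--         node = queue.popleft()
--         for neighbour in hashmap[node]:
--             if neighbour not in dist:
--                 dist[neighbour] = dist[node] + 1
--                 queue.append(neighbour)
--     return max(dist.values())
-- ===== Notes on version B (the rewrite author's own statement) =====
-- stated objective: simpler
-- what changed: Replaces the level-batch BFS over a freshly allocated 100001-slot visited array by a single-queue BFS over a distance dict (the dict itself is the visited check) that returns max(dist.values()), removing both the inner per-level loop and the fixed 10^5-sized array.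
-- outside the precondition, e.g. on bfs({-1: [100000], 100000: []}, -1): A returns 0, B returns 1
import Mathlib
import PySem

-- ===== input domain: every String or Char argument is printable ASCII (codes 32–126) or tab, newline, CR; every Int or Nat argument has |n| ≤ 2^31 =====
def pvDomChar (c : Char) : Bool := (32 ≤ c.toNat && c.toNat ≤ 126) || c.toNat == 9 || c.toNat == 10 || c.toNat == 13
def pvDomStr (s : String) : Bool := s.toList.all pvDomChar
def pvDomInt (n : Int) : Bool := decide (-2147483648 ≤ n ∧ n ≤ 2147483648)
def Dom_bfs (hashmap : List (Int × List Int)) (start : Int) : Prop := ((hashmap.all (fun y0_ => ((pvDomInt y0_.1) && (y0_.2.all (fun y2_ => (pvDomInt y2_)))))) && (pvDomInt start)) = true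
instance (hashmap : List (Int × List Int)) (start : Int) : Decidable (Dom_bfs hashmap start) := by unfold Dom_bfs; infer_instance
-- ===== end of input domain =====

-- B replaces A's level-batch BFS over a fixed 100001-slot visited array by a single-queue BFS
-- over a distance dict, returning the maximum recorded distance (objective: simpler, no 10^5 array).


-- ===== PORT A =====
-- 'for neighbour in hashmap[node]: if not visited[neighbour]: append; mark'
-- ('hashmap[node]' is ported as a dict lookup with default []; the KeyError case is excluded by Pre_bfs)
def bfsStepA (qv : List Int × List Bool) (nb : Int) : List Int × List Bool :=
  if !PySem.List.pyGetD qv.2 nb false then (qv.1 ++ [nb], PySem.List.pySetD qv.2 nb true)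
  else qv

def bfsScanA (hashmap : List (Int × List Int)) (node : Int)
    (qv : List Int × List Bool) : List Int × List Bool :=
  ((PySem.Dict.mk hashmap).getD node []).foldl bfsStepA qv

-- the inner 'for iteration in range(0, q_size)' loop: pop q_size nodes from the queue front
-- (the [] case is a popleft from an empty deque, unreachable: the counter starts as the queue length)
def bfsLevelA (hashmap : List (Int × List Int)) : Nat → List Int → List Bool → List Int × List Bool
  | 0, q, v => (q, v)
  | n + 1, q, v =>
    match q with
    | [] => ([], v)
    | node :: rest =>
      let qv := bfsScanA hashmap node (rest, v)
      bfsLevelA hashmap n qv.1 qv.2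

-- 'while queue: … ; if queue: total_time += 1'; fuel guard only: under Pre_bfs every level
-- past the first marks at least one new key visited, so hashmap.length + 1 levels suffice
def bfsLoopA (hashmap : List (Int × List Int)) : Nat → Int → List Int → List Bool → Int
  | 0, t, _, _ => t
  | f + 1, t, q, v =>
    if q.isEmpty then t
    else
      let qv := bfsLevelA hashmap q.length q v
      bfsLoopA hashmap f (if qv.1.isEmpty then t else t + 1) qv.1 qv.2

def bfs (hashmap : List (Int × List Int)) (start : Int) : Int :=
  let limit : Nat := 10 ^ 5 + 1
  let visited : List Bool := List.replicate limit false
  -- 'visited[start] = True'; exact for 0 ≤ start ≤ 100000 (Pre_bfs); out of range A raises IndexError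
  let visited := PySem.List.pySetD visited start true
  bfsLoopA hashmap (hashmap.length + 1) 0 [start] visited

-- ===== PORT B =====
-- 'if neighbour not in dist: dist[neighbour] = dist[node] + 1; queue.append(neighbour)'
def bfsStepB (node : Int) (dq : PySem.Dict Int Int × List Int) (nb : Int) :
    PySem.Dict Int Int × List Int :=
  if !dq.1.contains nb then (dq.1.insert nb (dq.1.getD node 0 + 1), dq.2 ++ [nb])
  else dq

-- 'while queue: node = queue.popleft(); for neighbour in hashmap[node]: …'
-- fuel guard only: under Pre_bfs each push adds a fresh key, so 2·hashmap.length + 2 pops suffice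
def bfsLoopB (hashmap : List (Int × List Int)) : Nat → PySem.Dict Int Int → List Int → PySem.Dict Int Int
  | 0, d, _ => d
  | _ + 1, d, [] => d
  | f + 1, d, node :: rest =>
    let dq := ((PySem.Dict.mk hashmap).getD node []).foldl (bfsStepB node) (d, rest)
    bfsLoopB hashmap f dq.1 dq.2

def bfs_alt (hashmap : List (Int × List Int)) (start : Int) : Int :=
  let dist : PySem.Dict Int Int := PySem.Dict.empty.insert start 0
  let dist := bfsLoopB hashmap (2 * hashmap.length + 2) dist [start]
  -- 'max(dist.values())'; dist always contains start, so the default is never used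
  (PySem.List.max? (PySem.Dict.values dist) (fun x => x)).getD 0

-- ===== PRECONDITION & SPEC =====
-- Pre_bfs asks for a closed, in-range, alias-free set U of keys containing start (U then contains
-- everything BFS reaches): it excludes the inputs where A raises (KeyError on a reached missing
-- key, IndexError on a reached id outside [-100001, 100000]) and the inputs whose value depends on
-- Python's negative-index aliasing of A's visited array (two reached ids differing by exactly
-- 100001 share one slot there, so A may skip a listed node that B visits).
def Pre_bfs (hashmap : List (Int × List Int)) (start : Int) : Prop :=
  ∃ U ∈ (hashmap.map Prod.fst).sublists,
    start ∈ U ∧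
    (∀ x ∈ U, -100001 ≤ x ∧ x ≤ 100000) ∧
    (∀ p ∈ hashmap, p.1 ∈ U → ∀ nb ∈ p.2, nb ∈ U) ∧
    (∀ i ∈ U, ∀ j ∈ U, i ≠ j → i - j ≠ 100001 ∧ j - i ≠ 100001)
instance (hashmap : List (Int × List Int)) (start : Int) : Decidable (Pre_bfs hashmap start) := by
  unfold Pre_bfs; infer_instance

def pvWitness_bfs : (List (Int × List Int)) × Int := ([(0, [])], 0)

def Spec_bfs (hashmap : List (Int × List Int)) (start : Int) (out : Int) : Prop := out = bfs_alt hashmap start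
instance (hashmap : List (Int × List Int)) (start : Int) (out : Int) : Decidable (Spec_bfs hashmap start out) := by unfold Spec_bfs; infer_instance

-- ===== CLAIM (what is proved, stated in full; the proofs are below) =====
def Claim_equal_bfs : Prop := ∀ (hashmap : List (Int × List Int)) (start : Int), Dom_bfs hashmap start → Pre_bfs hashmap start → Spec_bfs hashmap start (bfs hashmap start)

-- ===== LEMMAS AND PROOFS =====

-- the slot of the visited array that Python's (possibly negative) index i denotes
def vIdx (i : Int) : Nat := if 0 ≤ i then i.toNat else (100001 + i).toNat

lemma pyIdx_eq (i : Int) (h0 : -100001 ≤ i) (h1 : i ≤ 100000) :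
    PySem.List.pyIdx? 100001 i = some (vIdx i) := by
  unfold PySem.List.pyIdx? vIdx
  split_ifs
  all_goals try (exfalso; omega)
  all_goals simp only [Option.some.injEq]
  all_goals omega

lemma vIdx_lt (i : Int) (h0 : -100001 ≤ i) (h1 : i ≤ 100000) : vIdx i < 100001 := by
  unfold vIdx; split_ifs <;> omega

lemma pyGetD_idx (v : List Bool) (i : Int) (d : Bool) (hlen : v.length = 100001)
    (h0 : -100001 ≤ i) (h1 : i ≤ 100000) :
    PySem.List.pyGetD v i d = v[vIdx i]'(by rw [hlen]; exact vIdx_lt i h0 h1) := by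
  have hv := vIdx_lt i h0 h1
  rw [PySem.List.pyGetD, PySem.List.pyGet?]
  rw [show PySem.List.pyIdx? v.length i = some (vIdx i) from by
    rw [hlen]; exact pyIdx_eq i h0 h1]
  simp only [Option.bind_some]
  rw [List.getElem?_eq_getElem (show vIdx i < v.length by omega)]
  rfl

lemma pySetD_idx (v : List Bool) (i : Int) (x : Bool) (hlen : v.length = 100001)
    (h0 : -100001 ≤ i) (h1 : i ≤ 100000) :
    PySem.List.pySetD v i x = v.set (vIdx i) x := by
  rw [PySem.List.pySetD, PySem.List.pySet?]
  rw [show PySem.List.pyIdx? v.length i = some (vIdx i) from by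
    rw [hlen]; exact pyIdx_eq i h0 h1]
  rfl

lemma vIdx_inj (i j : Int) (hi0 : -100001 ≤ i) (hi1 : i ≤ 100000) (hj0 : -100001 ≤ j)
    (hj1 : j ≤ 100000) (hne : i ≠ j) (ha : i - j ≠ 100001) (hb : j - i ≠ 100001) :
    vIdx i ≠ vIdx j := by
  unfold vIdx; split_ifs <;> omega

lemma getD_mk_mem : ∀ (l : List (Int × List Int)) (node : Int),
    (PySem.Dict.mk l).getD node ([] : List Int) = [] ∨
    ∃ p ∈ l, p.1 = node ∧ (PySem.Dict.mk l).getD node [] = p.2 := by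
  intro l node
  induction l with
  | nil =>
      left
      rw [PySem.Dict.getD_eq_get?_getD]
      simp [PySem.Dict.get?]
  | cons p rest ih =>
      rw [PySem.Dict.getD_eq_get?_getD, PySem.Dict.get?_mk_cons]
      by_cases h : (p.1 == node) = true
      · right; exact ⟨p, by simp, by simpa using h, by simp [h]⟩
      · simp only [h, Bool.false_eq_true, if_false, ← PySem.Dict.getD_eq_get?_getD]
        rcases ih with h1 | ⟨q, hq, hqk, he⟩
        · left; exact h1
        · right; exact ⟨q, List.mem_cons_of_mem _ hq, hqk, he⟩

-- the hypotheses Pre_bfs grants about the set U that BFS stays inside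
def UOK (hashmap : List (Int × List Int)) (U : List Int) : Prop :=
  (∀ x ∈ U, -100001 ≤ x ∧ x ≤ 100000) ∧
  (∀ p ∈ hashmap, p.1 ∈ U → ∀ nb ∈ p.2, nb ∈ U) ∧
  (∀ i ∈ U, ∀ j ∈ U, i ≠ j → vIdx i ≠ vIdx j)

-- the visited array and the distance dict mark the same ids of U
def AlignVD (U : List Int) (v : List Bool) (d : PySem.Dict Int Int) : Prop :=
  ∀ i ∈ U, PySem.List.pyGetD v i false = d.contains i

lemma align_update (hashmap : List (Int × List Int)) (U : List Int) (hU : UOK hashmap U)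
    (v : List Bool) (d : PySem.Dict Int Int) (nb w : Int)
    (hlen : v.length = 100001) (hnbU : nb ∈ U) (ha : AlignVD U v d) :
    AlignVD U (PySem.List.pySetD v nb true) (d.insert nb w) := by
  obtain ⟨hr, _hc, hinj⟩ := hU
  intro i hiU
  obtain ⟨hnb0, hnb1⟩ := hr nb hnbU
  obtain ⟨hi0, hi1⟩ := hr i hiU
  rw [pySetD_idx v nb true hlen hnb0 hnb1]
  rw [pyGetD_idx _ i false (by simp [hlen]) hi0 hi1]
  rw [PySem.Dict.contains_insert]
  by_cases h : i = nb
  · subst h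
    simp [List.getElem_set_self]
  · have hvne : vIdx nb ≠ vIdx i := hinj nb hnbU i hiU (fun he => h he.symm)
    rw [List.getElem_set_ne hvne]
    have hai := ha i hiU
    rw [pyGetD_idx v i false hlen hi0 hi1] at hai
    rw [hai]
    have hbne : (i == nb) = false := by simp [h]
    simp [hbne]

lemma max_values_eq (d : PySem.Dict Int Int) (t : Int)
    (hub : ∀ p ∈ d.items, p.2 ≤ t) (hmem : t ∈ d.values) :
    (PySem.List.max? d.values (fun x => x)).getD 0 = t := by
  have hne : d.values ≠ [] := by intro h; rw [h] at hmem; simp at hmem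
  cases h : PySem.List.max? d.values (fun x => x) with
  | none => rw [PySem.List.max?_eq_none_iff] at h; exact absurd h hne
  | some m =>
      have hm := PySem.List.max?_mem h
      have hle : m ≤ t := by
        simp only [PySem.Dict.values] at hm
        obtain ⟨p, hp, hpv⟩ := List.mem_map.mp hm
        exact hpv ▸ hub p hp
      have hge : t ≤ m := PySem.List.max?_isMax h t hmem
      simp
      omega

lemma adj_okU (hashmap : List (Int × List Int)) (U : List Int) (hU : UOK hashmap U)
    (node : Int) (hnodeU : node ∈ U) :
    ∀ nb ∈ (PySem.Dict.mk hashmap).getD node ([] : List Int), nb ∈ U := by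
  obtain ⟨_hr, hc, _hinj⟩ := hU
  rcases getD_mk_mem hashmap node with h | ⟨p, hp, hpk, he⟩
  · rw [h]; simp
  · rw [he]; exact fun nb hnb => hc p hp (hpk ▸ hnodeU) nb hnb

lemma contains_false_iff (d : PySem.Dict Int Int) (k : Int) :
    d.contains k = false ↔ k ∉ d.keys := by
  rw [← PySem.Dict.contains_iff_mem_keys]
  cases d.contains k <;> simp

lemma scan_run (hashmap : List (Int × List Int)) (U : List Int) (hU : UOK hashmap U)
    (node t : Int) :
    ∀ (l q : List Int) (v : List Bool) (d : PySem.Dict Int Int),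
    (∀ nb ∈ l, nb ∈ U) →
    v.length = 100001 → d.keys.Nodup → AlignVD U v d → d.get? node = some t →
    ∃ New : List Int,
      (l.foldl bfsStepA (q, v)).1 = q ++ New ∧
      (l.foldl (bfsStepB node) (d, q)).2 = q ++ New ∧
      (l.foldl bfsStepA (q, v)).2.length = 100001 ∧
      (l.foldl (bfsStepB node) (d, q)).1.items = d.items ++ New.map (fun x => (x, t + 1)) ∧
      AlignVD U (l.foldl bfsStepA (q, v)).2 (l.foldl (bfsStepB node) (d, q)).1 ∧
      New.Nodup ∧ (∀ x ∈ New, d.contains x = false ∧ x ∈ U) := by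
  intro l
  induction l with
  | nil =>
      intro q v d _hl hlen _hnd ha _hnode
      exact ⟨[], by simp, by simp, by simpa using hlen, by simp, by simpa using ha, by simp, by simp⟩
  | cons nb l ih =>
      intro q v d hl hlen hnd ha hnode
      have hnbU : nb ∈ U := hl nb (by simp)
      have hvb : PySem.List.pyGetD v nb false = d.contains nb := ha nb hnbU
      simp only [List.foldl_cons]
      by_cases hc : d.contains nb = true
      · have hstepA : bfsStepA (q, v) nb = (q, v) := by simp [bfsStepA, hvb, hc]
        have hstepB : bfsStepB node (d, q) nb = (d, q) := by simp [bfsStepB, hc]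
        rw [hstepA, hstepB]
        exact ih q v d (fun x hx => hl x (by simp [hx])) hlen hnd ha hnode
      · have hcf : d.contains nb = false := by simpa using hc
        have hstepA : bfsStepA (q, v) nb = (q ++ [nb], PySem.List.pySetD v nb true) := by
          simp [bfsStepA, hvb, hcf]
        have hstepB : bfsStepB node (d, q) nb = (d.insert nb (t + 1), q ++ [nb]) := by
          have hg : d.getD node 0 = t := by
            rw [PySem.Dict.getD_eq_get?_getD, hnode]; rfl
          simp [bfsStepB, hcf, hg]
        rw [hstepA, hstepB]
        have hr := hU.1
        obtain ⟨hnb0, hnb1⟩ := hr nb hnbU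
        have hlen' : (PySem.List.pySetD v nb true).length = 100001 := by
          rw [PySem.List.length_pySetD]; exact hlen
        have hnd' : ((d.insert nb (t + 1)).keys).Nodup :=
          PySem.Dict.nodup_keys_insert d nb (t + 1) hnd
        have ha' := align_update hashmap U hU v d nb (t + 1) hlen hnbU ha
        have hnenb : node ≠ nb := by
          intro h
          rw [← h, PySem.Dict.contains_eq_isSome_get?, hnode] at hcf
          simp at hcf
        have hnode' : (d.insert nb (t + 1)).get? node = some t := by
          rw [PySem.Dict.get?_insert_of_ne d (t + 1) hnenb]; exact hnode
        obtain ⟨New, hA1, hB1, hA2, hB2, hal, hnodup, hfresh⟩ :=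
          ih (q ++ [nb]) _ _ (fun x hx => hl x (by simp [hx])) hlen' hnd' ha' hnode'
        refine ⟨nb :: New, ?_, ?_, hA2, ?_, hal, ?_, ?_⟩
        · rw [hA1]; simp
        · rw [hB1]; simp
        · rw [hB2, PySem.Dict.items_insert_of_not_contains d (t + 1) hcf]; simp
        · refine List.nodup_cons.mpr ⟨?_, hnodup⟩
          intro hmem
          obtain ⟨h1, _⟩ := hfresh nb hmem
          rw [PySem.Dict.contains_insert] at h1
          simp at h1
        · intro x hx
          rcases List.mem_cons.mp hx with rfl | hx'
          · exact ⟨hcf, hnbU⟩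
          · obtain ⟨h1, h2⟩ := hfresh x hx'
            rw [PySem.Dict.contains_insert] at h1
            simp only [Bool.or_eq_false_iff] at h1
            exact ⟨h1.2, h2⟩

lemma loopA_nil (hashmap : List (Int × List Int)) (f : Nat) (t : Int) (v : List Bool) :
    bfsLoopA hashmap f t [] v = t := by
  cases f <;> simp [bfsLoopA]

lemma loopB_nil (hashmap : List (Int × List Int)) (f : Nat) (d : PySem.Dict Int Int) :
    bfsLoopB hashmap f d [] = d := by
  cases f <;> simp [bfsLoopB]

lemma level_run (hashmap : List (Int × List Int)) (U : List Int) (hU : UOK hashmap U) (t : Int) :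
    ∀ (F R : List Int) (v : List Bool) (d : PySem.Dict Int Int),
    v.length = 100001 → d.keys.Nodup → AlignVD U v d →
    (∀ x ∈ F, x ∈ U) →
    (∀ x ∈ F, d.get? x = some t) → (∀ x ∈ R, d.get? x = some (t + 1)) →
    ∃ (New : List Int) (V' : List Bool) (D' : PySem.Dict Int Int),
      bfsLevelA hashmap F.length (F ++ R) v = (R ++ New, V') ∧
      (∀ fB : Nat, bfsLoopB hashmap (fB + F.length) d (F ++ R) = bfsLoopB hashmap fB D' (R ++ New)) ∧
      V'.length = 100001 ∧ D'.keys.Nodup ∧ AlignVD U V' D' ∧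
      D'.items = d.items ++ New.map (fun x => (x, t + 1)) ∧
      New.Nodup ∧ (∀ x ∈ New, d.contains x = false ∧ x ∈ U) := by
  intro F
  induction F with
  | nil =>
      intro R v d hlen hnd ha _hFU _hF hR
      exact ⟨[], v, d, by simp [bfsLevelA], fun fB => by simp, hlen, hnd, ha, by simp, by simp,
        by simp⟩
  | cons node F' ih =>
      intro R v d hlen hnd ha hFU hF hR
      have hnode : d.get? node = some t := hF node (by simp)
      have hadj : ∀ nb ∈ (PySem.Dict.mk hashmap).getD node ([] : List Int), nb ∈ U :=
        adj_okU hashmap U hU node (hFU node (by simp))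
      obtain ⟨N1, hA1, hB1, hA2, hB2, hal1, hnd1, hfr1⟩ :=
        scan_run hashmap U hU node t ((PySem.Dict.mk hashmap).getD node []) (F' ++ R) v d hadj
          hlen hnd ha hnode
      set adj := (PySem.Dict.mk hashmap).getD node ([] : List Int) with hadjdef
      set v1 := (adj.foldl bfsStepA (F' ++ R, v)).2 with hv1
      set d1 := (adj.foldl (bfsStepB node) (d, F' ++ R)).1 with hd1
      have hkeys1 : d1.keys = d.keys ++ N1 := by
        simp only [PySem.Dict.keys, hB2, List.map_append]
        congr 1
        simp [Function.comp_def]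
      have hnd1' : d1.keys.Nodup := by
        rw [hkeys1]
        refine List.Nodup.append hnd hnd1 ?_
        intro x hx hx2
        exact ((contains_false_iff d x).mp (hfr1 x hx2).1) hx
      have hget1 : ∀ x val, d.get? x = some val → d1.get? x = some val := by
        intro x val hx
        refine PySem.Dict.get?_of_mem_items d1 ?_ hnd1'
        rw [hB2]
        exact List.mem_append_left _ (PySem.Dict.mem_items_of_get?_eq_some d hx)
      have hget1N : ∀ x ∈ N1, d1.get? x = some (t + 1) := by
        intro x hx
        refine PySem.Dict.get?_of_mem_items d1 ?_ hnd1'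
        rw [hB2]
        exact List.mem_append_right _ (List.mem_map_of_mem hx)
      have hF' : ∀ x ∈ F', d1.get? x = some t := fun x hx => hget1 x t (hF x (by simp [hx]))
      have hR1 : ∀ x ∈ R ++ N1, d1.get? x = some (t + 1) := by
        intro x hx
        rcases List.mem_append.mp hx with h | h
        · exact hget1 x (t + 1) (hR x h)
        · exact hget1N x h
      obtain ⟨N2, V', D', hlev, hrun, hVlen, hDnd, hal, hitems, hnod2, hfr2⟩ :=
        ih (R ++ N1) v1 d1 hA2 hnd1' hal1 (fun x hx => hFU x (by simp [hx])) hF' hR1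
      have hN2d1 : ∀ x ∈ N2, x ∉ d1.keys := fun x hx => (contains_false_iff d1 x).mp (hfr2 x hx).1
      refine ⟨N1 ++ N2, V', D', ?_, ?_, hVlen, hDnd, hal, ?_, ?_, ?_⟩
      · have hstep : bfsLevelA hashmap (node :: F').length ((node :: F') ++ R) v =
            bfsLevelA hashmap F'.length (bfsScanA hashmap node (F' ++ R, v)).1
              (bfsScanA hashmap node (F' ++ R, v)).2 := rfl
        rw [hstep]
        have h1 : (bfsScanA hashmap node (F' ++ R, v)).1 = F' ++ (R ++ N1) := by
          rw [bfsScanA, ← hadjdef, hA1, List.append_assoc]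
        have h2 : (bfsScanA hashmap node (F' ++ R, v)).2 = v1 := by
          rw [bfsScanA, ← hadjdef, hv1]
        rw [h1, h2, hlev, List.append_assoc]
      · intro fB
        have hfuel : fB + (node :: F').length = (fB + F'.length) + 1 := by
          simp only [List.length_cons]
          omega
        rw [hfuel]
        have hstep : bfsLoopB hashmap ((fB + F'.length) + 1) d ((node :: F') ++ R) =
            bfsLoopB hashmap (fB + F'.length)
              ((adj.foldl (bfsStepB node) (d, F' ++ R)).1)
              ((adj.foldl (bfsStepB node) (d, F' ++ R)).2) := rfl
        rw [hstep, ← hd1, hB1, List.append_assoc, hrun fB, List.append_assoc]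
      · rw [hitems, hB2, List.append_assoc, ← List.map_append]
      · refine List.Nodup.append hnd1 hnod2 ?_
        intro x hx hx2
        exact hN2d1 x hx2 (by rw [hkeys1]; exact List.mem_append_right _ hx)
      · intro x hx
        rcases List.mem_append.mp hx with h | h
        · exact hfr1 x h
        · refine ⟨(contains_false_iff d x).mpr ?_, (hfr2 x h).2⟩
          intro hk
          exact hN2d1 x h (by rw [hkeys1]; exact List.mem_append_left _ hk)

lemma main_run (hashmap : List (Int × List Int)) (U : List Int) (hU : UOK hashmap U) :
    ∀ (fA : Nat) (t : Int) (q : List Int) (v : List Bool) (d : PySem.Dict Int Int) (fB : Nat),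
    q ≠ [] → v.length = 100001 → d.keys.Nodup → AlignVD U v d →
    (∀ x ∈ q, d.get? x = some t) →
    (∀ p ∈ d.items, p.2 ≤ t) →
    (∀ k ∈ d.keys, k ∈ U) →
    1 + (U.toFinset \ d.keys.toFinset).card ≤ fA →
    q.length + 2 * (U.toFinset \ d.keys.toFinset).card ≤ fB →
    bfsLoopA hashmap fA t q v =
      (PySem.List.max? (PySem.Dict.values (bfsLoopB hashmap fB d q)) (fun x => x)).getD 0 := by
  intro fA
  induction fA with
  | zero =>
      intro t q v d fB hq hlen hnd ha hvalq hub hkeys hfA hfB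
      omega
  | succ fA ih =>
      intro t q v d fB hq hlen hnd ha hvalq hub hkeys hfA hfB
      have hqU : ∀ x ∈ q, x ∈ U := by
        intro x hx
        refine hkeys x ?_
        rw [← PySem.Dict.contains_iff_mem_keys, PySem.Dict.contains_eq_isSome_get?, hvalq x hx]
        rfl
      obtain ⟨N, V', D', hlev, hrun, hVlen, hDnd, hal, hitems, hNnd, hNfr⟩ :=
        level_run hashmap U hU t q [] v d hlen hnd ha hqU hvalq (by simp)
      rw [List.append_nil] at hlev hrun
      simp only [List.nil_append] at hlev hrun
      have hqE : q.isEmpty = false := by simp [hq]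
      have hAstep : bfsLoopA hashmap (fA + 1) t q v =
          bfsLoopA hashmap fA (if N.isEmpty then t else t + 1) N V' := by
        rw [bfsLoopA]
        simp only [hqE, Bool.false_eq_true, if_false, hlev]
      obtain ⟨fB', rfl⟩ : ∃ fB', fB = fB' + q.length := ⟨fB - q.length, by omega⟩
      have hBstep := hrun fB'
      have hkeysD : D'.keys = d.keys ++ N := by
        simp only [PySem.Dict.keys, hitems, List.map_append]
        congr 1
        simp [Function.comp_def]
      have hNfresh : ∀ x ∈ N, x ∉ d.keys :=
        fun x hx => (contains_false_iff d x).mp (hNfr x hx).1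
      have hNfin : N.toFinset ⊆ U.toFinset \ d.keys.toFinset := by
        intro x hx
        have hx' := List.mem_toFinset.mp hx
        exact Finset.mem_sdiff.mpr ⟨List.mem_toFinset.mpr (hNfr x hx').2,
          fun hc => hNfresh x hx' (List.mem_toFinset.mp hc)⟩
      have hcardN : N.toFinset.card = N.length := List.toFinset_card_of_nodup hNnd
      have hsd : U.toFinset \ D'.keys.toFinset =
          (U.toFinset \ d.keys.toFinset) \ N.toFinset := by
        rw [hkeysD, List.toFinset_append, sdiff_sdiff]
        rfl
      have hcard' : (U.toFinset \ D'.keys.toFinset).card + N.length =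
          (U.toFinset \ d.keys.toFinset).card := by
        rw [hsd, Finset.card_sdiff, Finset.inter_eq_left.mpr hNfin, hcardN]
        have := Finset.card_le_card hNfin
        omega
      rcases eq_or_ne N [] with rfl | hN
      · have hD'd : D' = d := PySem.Dict.ext (by simpa using hitems)
        rw [hAstep, List.isEmpty_nil, if_pos rfl, loopA_nil, hBstep, loopB_nil, hD'd]
        obtain ⟨x, hxq⟩ : ∃ x, x ∈ q := by
          cases q with
          | nil => exact absurd rfl hq
          | cons a l => exact ⟨a, by simp⟩
        have hmem : t ∈ d.values := by
          have hit := PySem.Dict.mem_items_of_get?_eq_some d (hvalq x hxq)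
          simp only [PySem.Dict.values]
          exact List.mem_map.mpr ⟨(x, t), hit, rfl⟩
        exact (max_values_eq d t hub hmem).symm
      · have hisE : N.isEmpty = false := by simp [hN]
        rw [hAstep, hisE, if_neg (by simp), hBstep]
        have hvalN : ∀ x ∈ N, D'.get? x = some (t + 1) := by
          intro x hx
          refine PySem.Dict.get?_of_mem_items D' ?_ hDnd
          rw [hitems]
          exact List.mem_append_right _ (List.mem_map_of_mem hx)
        have hub' : ∀ p ∈ D'.items, p.2 ≤ t + 1 := by
          intro p hp
          rw [hitems] at hp
          rcases List.mem_append.mp hp with h | h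
          · exact le_trans (hub p h) (by omega)
          · obtain ⟨x, _hx, rfl⟩ := List.mem_map.mp h
            simp
        have hkeys' : ∀ k ∈ D'.keys, k ∈ U := by
          rw [hkeysD]
          intro k hk
          rcases List.mem_append.mp hk with h | h
          · exact hkeys k h
          · exact (hNfr k h).2
        have hNlen : 1 ≤ N.length := by
          cases N with
          | nil => exact absurd rfl hN
          | cons a l => simp
        exact ih (t + 1) N V' D' fB' hN hVlen hDnd hal hvalN hub' hkeys'
          (by omega) (by omega)

-- ===== VERDICT (by name: the statement is the Claim_ definition above) =====
theorem bfs_spec : Claim_equal_bfs := by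
  intro hashmap start _hDom hPre
  obtain ⟨U, hUmem, hstartU, hUr, hUc, hUa⟩ := hPre
  have hUsub : U.Sublist (hashmap.map Prod.fst) := (List.mem_sublists).mp hUmem
  have hU : UOK hashmap U := by
    refine ⟨hUr, hUc, ?_⟩
    intro i hi j hj hne
    obtain ⟨hi0, hi1⟩ := hUr i hi
    obtain ⟨hj0, hj1⟩ := hUr j hj
    obtain ⟨ha, hb⟩ := hUa i hi j hj hne
    exact vIdx_inj i j hi0 hi1 hj0 hj1 hne ha hb
  obtain ⟨hs0, hs1⟩ := hUr start hstartU
  have hlen : (PySem.List.pySetD (List.replicate (10 ^ 5 + 1) false) start true).length =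
      100001 := by
    rw [PySem.List.length_pySetD, List.length_replicate]
    norm_num
  have hrlen : (List.replicate (10 ^ 5 + 1) (false : Bool)).length = 100001 := by
    rw [List.length_replicate]; norm_num
  have ha0 : AlignVD U (PySem.List.pySetD (List.replicate (10 ^ 5 + 1) false) start true)
      (PySem.Dict.empty.insert start 0) := by
    refine align_update hashmap U hU _ _ start 0 hrlen hstartU ?_
    intro i hiU
    obtain ⟨hi0, hi1⟩ := hUr i hiU
    rw [pyGetD_idx _ i false hrlen hi0 hi1, List.getElem_replicate]
    simp [PySem.Dict.contains_empty]
  have hitems0 : (PySem.Dict.empty.insert start 0 : PySem.Dict Int Int).items = [(start, 0)] := by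
    rw [PySem.Dict.items_insert_of_not_contains PySem.Dict.empty 0 (PySem.Dict.contains_empty start)]
    simp [PySem.Dict.empty]
  have hkeys0 : (PySem.Dict.empty.insert start 0 : PySem.Dict Int Int).keys = [start] := by
    simp [PySem.Dict.keys, hitems0]
  have hnd0 : (PySem.Dict.empty.insert start 0 : PySem.Dict Int Int).keys.Nodup := by
    rw [hkeys0]; simp
  have hub0 : ∀ q ∈ (PySem.Dict.empty.insert start 0 : PySem.Dict Int Int).items,
      q.2 ≤ (0 : Int) := by
    intro q hq
    rw [hitems0] at hq
    simp at hq
    simp [hq]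
  have hk0 : ∀ k ∈ (PySem.Dict.empty.insert start 0 : PySem.Dict Int Int).keys, k ∈ U := by
    intro k hk
    rw [hkeys0] at hk
    simp at hk
    exact hk ▸ hstartU
  have hq0 : ∀ x ∈ [start], (PySem.Dict.empty.insert start 0 : PySem.Dict Int Int).get? x =
      some 0 := by
    intro x hx
    simp only [List.mem_singleton] at hx
    rw [hx]
    exact PySem.Dict.get?_insert_self PySem.Dict.empty start 0
  have hcard : (U.toFinset \
      (PySem.Dict.empty.insert start 0 : PySem.Dict Int Int).keys.toFinset).card ≤
      hashmap.length := by
    have h1 := Finset.card_le_card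
      (Finset.sdiff_subset (s := U.toFinset)
        (t := (PySem.Dict.empty.insert start 0 : PySem.Dict Int Int).keys.toFinset))
    have h2 := List.toFinset_card_le U
    have h3 := List.Sublist.length_le hUsub
    have h4 : (hashmap.map Prod.fst).length = hashmap.length := List.length_map ..
    omega
  have harithA : 1 + (U.toFinset \
      (PySem.Dict.empty.insert start 0 : PySem.Dict Int Int).keys.toFinset).card ≤
      hashmap.length + 1 := by omega
  have harithB : [start].length + 2 * (U.toFinset \
      (PySem.Dict.empty.insert start 0 : PySem.Dict Int Int).keys.toFinset).card ≤
      2 * hashmap.length + 2 := by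
    simp only [List.length_cons, List.length_nil]
    omega
  exact main_run hashmap U hU (hashmap.length + 1) 0 [start] _ _ (2 * hashmap.length + 2)
    (by simp) hlen hnd0 ha0 hq0 hub0 hk0 harithA harithB
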